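-- pv_equiv track=rewrite | github.com/yzf0470/TeraNoC | software/apps/spatz_apps/sp-fconv2d/script/gen_data.py | zero_pad
-- ===== SOURCE A (Python) =====
-- def zero_pad(a, CH, R, C, F):
--     for ch in range(CH):
--       for j in range(int((F - 1) / 2)):
--         for i in range(R):
--             a[ch][i][j]     = 0
--             a[ch][i][C-1-j] = 0
--       for i in range(int((F - 1) / 2)):
--         for j in range(C):
--             a[ch][i][j]     = 0
--             a[ch][R-1-i][j] = 0
--     return a
-- ===== SOURCE B (Python) =====
-- def zero_pad(a, CH, R, C, F):
--     p = int((F - 1) / 2)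
--     if p <= 0:
--         return a
--     for ch in range(CH):
--         for i in range(R):
--             for j in range(C):
--                 if i < p or i >= R - p or j < p or j >= C - p:
--                     a[ch][i][j] = 0
--     return a
-- ===== Notes on version B (the rewrite author's own statement) =====
-- stated objective: alternative
-- what changed: Replaces A's two mirrored border loop-nests per channel (column nest writing j and C-1-j, row nest writing i and R-1-i) by one uniform full scan over all cells guarded by a single boundary predicate, with the pad width computed once and an early return when it is non-positive; Pre_ excludes the inputs where A raises IndexError and the degenerate R=0/C=0 corners where A's mirrored indices R-1-i/C-1-j wrap around negatively and overwrite unrelated cells.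
-- outside the precondition, e.g. on zero_pad([[[1], [2]]], 1, 0, 1, 3): A returns [[[0], [0]]], B returns [[[1], [2]]]
import Mathlib
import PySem

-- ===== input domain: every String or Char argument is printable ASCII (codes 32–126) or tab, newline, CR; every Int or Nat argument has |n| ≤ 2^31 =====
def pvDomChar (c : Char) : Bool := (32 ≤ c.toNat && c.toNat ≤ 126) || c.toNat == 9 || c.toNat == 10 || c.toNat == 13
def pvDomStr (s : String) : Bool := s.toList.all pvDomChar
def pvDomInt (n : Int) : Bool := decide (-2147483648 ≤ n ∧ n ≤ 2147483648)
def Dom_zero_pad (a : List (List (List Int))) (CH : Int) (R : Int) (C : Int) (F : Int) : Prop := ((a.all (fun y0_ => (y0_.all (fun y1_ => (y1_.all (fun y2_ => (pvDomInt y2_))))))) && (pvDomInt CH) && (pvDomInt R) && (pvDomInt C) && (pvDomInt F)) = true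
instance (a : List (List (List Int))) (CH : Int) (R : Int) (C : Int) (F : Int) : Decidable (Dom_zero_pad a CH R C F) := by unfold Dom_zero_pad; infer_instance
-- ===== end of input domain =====

-- B replaces A's two mirrored border loop-nests per channel by one full scan with a
-- boundary predicate (alternative decomposition, not faster). Both A and B mutate `a`
-- in place in Python and return it; the equivalence proved here is about the return value.


-- ===== PORT A =====
-- Python index resolution for `l[i] = …`: negative indices wrap; an out-of-range index
-- raises IndexError in Python — those inputs are excluded by Pre_zero_pad, the port no-ops there.
def pyResolve (n : Nat) (i : Int) : Option Nat :=
  let i' := if i < 0 then i + n else i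
  if 0 ≤ i' ∧ i' < (n : Int) then some i'.toNat else none

-- `a[ch][i][j] = v` on a nested list, exact wherever Python does not raise.
def pySet3 (a : List (List (List Int))) (ch i j v : Int) : List (List (List Int)) :=
  (pyResolve a.length ch).elim a (fun c =>
    (pyResolve (a.getD c []).length i).elim a (fun i' =>
      (pyResolve ((a.getD c []).getD i' []).length j).elim a (fun j' =>
        a.set c ((a.getD c []).set i' (((a.getD c []).getD i' []).set j' v)))))

-- int((F-1)/2): float division is exact here (|F| ≤ 2^31), int() truncates toward zero = truncdiv.
def zero_pad (a : List (List (List Int))) (CH : Int) (R : Int) (C : Int) (F : Int) : List (List (List Int)) :=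
  (PySem.List.pyRange 0 CH 1).foldl (fun a ch =>
    let a := (PySem.List.pyRange 0 (PySem.Int.truncdiv (F - 1) 2) 1).foldl (fun a j =>
      (PySem.List.pyRange 0 R 1).foldl (fun a i =>
        pySet3 (pySet3 a ch i j 0) ch i (C - 1 - j) 0) a) a
    (PySem.List.pyRange 0 (PySem.Int.truncdiv (F - 1) 2) 1).foldl (fun a i =>
      (PySem.List.pyRange 0 C 1).foldl (fun a j =>
        pySet3 (pySet3 a ch i j 0) ch (R - 1 - i) j 0) a) a) a

-- ===== PORT B =====
def zero_pad_alt (a : List (List (List Int))) (CH : Int) (R : Int) (C : Int) (F : Int) : List (List (List Int)) :=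
  let p := PySem.Int.truncdiv (F - 1) 2
  if p ≤ 0 then a else
  (PySem.List.pyRange 0 CH 1).foldl (fun a ch =>
    (PySem.List.pyRange 0 R 1).foldl (fun a i =>
      (PySem.List.pyRange 0 C 1).foldl (fun a j =>
        if i < p ∨ i ≥ R - p ∨ j < p ∨ j ≥ C - p then pySet3 a ch i j 0 else a) a) a) a

-- ===== PRECONDITION & SPEC =====
-- When p = int((F-1)/2) ≥ 1 and CH > 0, Python A raises IndexError unless p ≤ R, p ≤ C and the
-- first CH channels of `a` have at least R rows whose first R rows have at least C entries; Pre_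
-- excludes only those raising inputs plus the degenerate R = 0 / C = 0 corners where A's mirrored
-- indices R-1-i / C-1-j wrap around negatively and silently overwrite unrelated cells.
def Pre_zero_pad (a : List (List (List Int))) (CH : Int) (R : Int) (C : Int) (F : Int) : Prop :=
  1 ≤ PySem.Int.truncdiv (F - 1) 2 → 0 < CH →
    (PySem.Int.truncdiv (F - 1) 2 ≤ R ∧ PySem.Int.truncdiv (F - 1) 2 ≤ C ∧
     CH.toNat ≤ a.length ∧
     ∀ l ∈ a.take CH.toNat, R.toNat ≤ l.length ∧ ∀ r ∈ l.take R.toNat, C.toNat ≤ r.length)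
instance (a : List (List (List Int))) (CH : Int) (R : Int) (C : Int) (F : Int) : Decidable (Pre_zero_pad a CH R C F) := by unfold Pre_zero_pad; infer_instance

def pvWitness_zero_pad : List (List (List Int)) × Int × Int × Int × Int :=
  ([[[1, 2, 3], [4, 5, 6], [7, 8, 9]]], 1, 3, 3, 3)

def Spec_zero_pad (a : List (List (List Int))) (CH : Int) (R : Int) (C : Int) (F : Int) (out : List (List (List Int))) : Prop := out = zero_pad_alt a CH R C F
instance (a : List (List (List Int))) (CH : Int) (R : Int) (C : Int) (F : Int) (out : List (List (List Int))) : Decidable (Spec_zero_pad a CH R C F out) := by unfold Spec_zero_pad; infer_instance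

-- ===== CLAIM (what is proved, stated in full; the proofs are below) =====
def Claim_equal_zero_pad : Prop := ∀ (a : List (List (List Int))) (CH : Int) (R : Int) (C : Int) (F : Int), Dom_zero_pad a CH R C F → Pre_zero_pad a CH R C F → Spec_zero_pad a CH R C F (zero_pad a CH R C F)


-- ===== LEMMAS AND PROOFS =====

-- three-level length/read accessors used to compare the two fold results pointwise
def pvLen2 (a : List (List (List Int))) (c : Nat) : Nat := (a.getD c []).length
def pvLen3 (a : List (List (List Int))) (c i : Nat) : Nat := ((a.getD c []).getD i []).length
def pvGet3 (a : List (List (List Int))) (c i j : Nat) : Int := ((a.getD c []).getD i []).getD j 0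

def pvInB (a : List (List (List Int))) (w : Int × Int × Int) : Prop :=
  0 ≤ w.1 ∧ w.1 < (a.length : Int) ∧ 0 ≤ w.2.1 ∧ w.2.1 < (pvLen2 a w.1.toNat : Int) ∧
  0 ≤ w.2.2 ∧ w.2.2 < (pvLen3 a w.1.toNat w.2.1.toNat : Int)

def pvApply (W : List (Int × Int × Int)) (a : List (List (List Int))) : List (List (List Int)) :=
  W.foldl (fun a w => pySet3 a w.1 w.2.1 w.2.2 0) a

theorem pvApply_nil (a : List (List (List Int))) : pvApply [] a = a := rfl
theorem pvApply_cons (w : Int × Int × Int) (W : List (Int × Int × Int)) (a : List (List (List Int))) :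
    pvApply (w :: W) a = pvApply W (pySet3 a w.1 w.2.1 w.2.2 0) := rfl
theorem pvApply_append (W1 W2 : List (Int × Int × Int)) (a : List (List (List Int))) :
    pvApply (W1 ++ W2) a = pvApply W2 (pvApply W1 a) := by
  simp [pvApply, List.foldl_append]

theorem foldl_pvApply {α : Type} (l : List α) (g : α → List (Int × Int × Int)) (a : List (List (List Int))) :
    l.foldl (fun a x => pvApply (g x) a) a = pvApply (l.flatMap g) a := by
  induction l generalizing a with
  | nil => simp [pvApply]
  | cons x t ih => simp [List.flatMap_cons, pvApply_append, ih]

theorem pvApply_if (c : Prop) [Decidable c] (X Y : List (Int × Int × Int)) (a : List (List (List Int))) :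
    pvApply (if c then X else Y) a = if c then pvApply X a else pvApply Y a := by
  split <;> rfl

theorem pvGetD_set {α : Type} (l : List α) (n : Nat) (x : α) (k : Nat) (d : α) :
    (l.set n x).getD k d = if n = k ∧ n < l.length then x else l.getD k d := by
  simp [List.getD, List.getElem?_set]
  split_ifs with h1 h2 h3 <;> simp_all <;> omega

theorem pyResolve_of_nonneg (n : Nat) (i : Int) (h0 : 0 ≤ i) (h1 : i < (n : Int)) :
    pyResolve n i = some i.toNat := by
  unfold pyResolve
  rw [if_neg (show ¬ i < 0 by omega)]
  rw [if_pos ⟨h0, h1⟩]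

theorem pySet3_eq (a : List (List (List Int))) (ch i j v : Int) (h : pvInB a (ch, i, j)) :
    pySet3 a ch i j v =
      a.set ch.toNat ((a.getD ch.toNat []).set i.toNat
        (((a.getD ch.toNat []).getD i.toNat []).set j.toNat v)) := by
  obtain ⟨h1, h2, h3, h4, h5, h6⟩ := h
  have e1 := pyResolve_of_nonneg a.length ch h1 h2
  have e2 := pyResolve_of_nonneg (a.getD ch.toNat []).length i h3 (by simpa [pvLen2] using h4)
  have e3 := pyResolve_of_nonneg ((a.getD ch.toNat []).getD i.toNat []).length j h5
    (by simpa [pvLen3] using h6)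
  simp only [pySet3, e1, e2, e3, Option.elim_some]

theorem pvLen1_pySet3 (a : List (List (List Int))) (ch i j v : Int) :
    (pySet3 a ch i j v).length = a.length := by
  cases h1 : pyResolve a.length ch
  · simp only [pySet3, h1, Option.elim_none]
  case some c =>
    cases h2 : pyResolve (a.getD c []).length i
    · simp only [pySet3, h1, h2, Option.elim_none, Option.elim_some]
    case some i' =>
      cases h3 : pyResolve ((a.getD c []).getD i' []).length j
      · simp only [pySet3, h1, h2, h3, Option.elim_none, Option.elim_some]
      case some j' =>
        simp only [pySet3, h1, h2, h3, Option.elim_some]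
        simp

theorem pvLen2_pySet3 (a : List (List (List Int))) (ch i j v : Int) (c' : Nat) :
    pvLen2 (pySet3 a ch i j v) c' = pvLen2 a c' := by
  cases h1 : pyResolve a.length ch
  · simp only [pySet3, h1, Option.elim_none]
  case some c =>
    cases h2 : pyResolve (a.getD c []).length i
    · simp only [pySet3, h1, h2, Option.elim_none, Option.elim_some]
    case some i' =>
      cases h3 : pyResolve ((a.getD c []).getD i' []).length j
      · simp only [pySet3, h1, h2, h3, Option.elim_none, Option.elim_some]
      case some j' =>
        simp only [pySet3, h1, h2, h3, Option.elim_some, pvLen2]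
        rw [pvGetD_set]
        split_ifs with h
        · obtain ⟨rfl, _⟩ := h; simp
        · rfl

theorem pvLen3_pySet3 (a : List (List (List Int))) (ch i j v : Int) (c' i' : Nat) :
    pvLen3 (pySet3 a ch i j v) c' i' = pvLen3 a c' i' := by
  cases h1 : pyResolve a.length ch
  · simp only [pySet3, h1, Option.elim_none]
  case some c =>
    cases h2 : pyResolve (a.getD c []).length i
    · simp only [pySet3, h1, h2, Option.elim_none, Option.elim_some]
    case some i0 =>
      cases h3 : pyResolve ((a.getD c []).getD i0 []).length j
      · simp only [pySet3, h1, h2, h3, Option.elim_none, Option.elim_some]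
      case some j0 =>
        simp only [pySet3, h1, h2, h3, Option.elim_some, pvLen3]
        rw [pvGetD_set]
        split_ifs with h
        · obtain ⟨rfl, _⟩ := h
          rw [pvGetD_set]
          split_ifs with hb
          · obtain ⟨rfl, _⟩ := hb; simp
          · rfl
        · rfl

theorem pvGet3_pySet3 (a : List (List (List Int))) (ch i j : Int) (h : pvInB a (ch, i, j)) (c' i' j' : Nat) :
    pvGet3 (pySet3 a ch i j 0) c' i' j' =
      if ch.toNat = c' ∧ i.toNat = i' ∧ j.toNat = j' then 0 else pvGet3 a c' i' j' := by
  obtain ⟨h1, h2, h3, h4, h5, h6⟩ := h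
  dsimp only at h1 h2 h3 h4 h5 h6
  rw [pySet3_eq a ch i j 0 ⟨h1, h2, h3, h4, h5, h6⟩]
  simp only [pvLen2] at h4
  simp only [pvLen3] at h6
  unfold pvGet3
  rw [pvGetD_set]
  by_cases hc : ch.toNat = c'
  · subst hc
    rw [if_pos ⟨rfl, by omega⟩]
    rw [pvGetD_set]
    by_cases hi : i.toNat = i'
    · subst hi
      rw [if_pos ⟨rfl, by omega⟩]
      rw [pvGetD_set]
      by_cases hj : j.toNat = j'
      · subst hj
        rw [if_pos ⟨rfl, by omega⟩, if_pos ⟨rfl, rfl, rfl⟩]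
      · rw [if_neg (fun hh => hj hh.1), if_neg (fun hh => hj hh.2.2)]
    · rw [if_neg (fun hh => hi hh.1), if_neg (fun hh => hi hh.2.1)]
  · rw [if_neg (fun hh => hc hh.1), if_neg (fun hh => hc hh.1)]

theorem pvInB_pySet3 (a : List (List (List Int))) (ch i j v : Int) (w : Int × Int × Int)
    (h : pvInB a w) : pvInB (pySet3 a ch i j v) w := by
  unfold pvInB at h ⊢
  rw [pvLen1_pySet3, pvLen2_pySet3, pvLen3_pySet3]
  exact h

theorem pvLen1_pvApply (W : List (Int × Int × Int)) (a : List (List (List Int))) :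
    (pvApply W a).length = a.length := by
  induction W generalizing a with
  | nil => rfl
  | cons w t ih => rw [pvApply_cons, ih, pvLen1_pySet3]

theorem pvLen2_pvApply (W : List (Int × Int × Int)) (a : List (List (List Int))) (c' : Nat) :
    pvLen2 (pvApply W a) c' = pvLen2 a c' := by
  induction W generalizing a with
  | nil => rfl
  | cons w t ih => rw [pvApply_cons, ih, pvLen2_pySet3]

theorem pvLen3_pvApply (W : List (Int × Int × Int)) (a : List (List (List Int))) (c' i' : Nat) :
    pvLen3 (pvApply W a) c' i' = pvLen3 a c' i' := by
  induction W generalizing a with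
  | nil => rfl
  | cons w t ih => rw [pvApply_cons, ih, pvLen3_pySet3]

theorem pvGet3_pvApply (W : List (Int × Int × Int)) (a : List (List (List Int)))
    (HW : ∀ w ∈ W, pvInB a w) (c' i' j' : Nat) :
    pvGet3 (pvApply W a) c' i' j' =
      if ∃ w ∈ W, w.1.toNat = c' ∧ w.2.1.toNat = i' ∧ w.2.2.toNat = j' then 0
      else pvGet3 a c' i' j' := by
  induction W generalizing a with
  | nil => simp [pvApply_nil]
  | cons w t ih =>
    have hw : pvInB a w := HW w (List.mem_cons_self)
    have HW' : ∀ u ∈ t, pvInB (pySet3 a w.1 w.2.1 w.2.2 0) u := fun u hu =>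
      pvInB_pySet3 _ _ _ _ _ _ (HW u (List.mem_cons_of_mem _ hu))
    rw [pvApply_cons, ih _ HW', pvGet3_pySet3 _ _ _ _ hw]
    by_cases ht : ∃ u ∈ t, u.1.toNat = c' ∧ u.2.1.toNat = i' ∧ u.2.2.toNat = j' <;>
      by_cases hw0 : w.1.toNat = c' ∧ w.2.1.toNat = i' ∧ w.2.2.toNat = j' <;>
      simp [ht, hw0]

theorem pvExt (x y : List (List (List Int))) (h1 : x.length = y.length)
    (h2 : ∀ c, pvLen2 x c = pvLen2 y c) (h3 : ∀ c i, pvLen3 x c i = pvLen3 y c i)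
    (h4 : ∀ c i j, pvGet3 x c i j = pvGet3 y c i j) : x = y := by
  apply List.ext_getElem h1
  intro c hc hc'
  have e2 : x[c].length = y[c].length := by
    have := h2 c
    unfold pvLen2 at this
    rwa [List.getD_eq_getElem x [] hc, List.getD_eq_getElem y [] hc'] at this
  apply List.ext_getElem e2
  intro i hi hi'
  have e3 : x[c][i].length = y[c][i].length := by
    have := h3 c i
    unfold pvLen3 at this
    rwa [List.getD_eq_getElem x [] hc, List.getD_eq_getElem y [] hc',
      List.getD_eq_getElem _ [] hi, List.getD_eq_getElem _ [] hi'] at this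
  apply List.ext_getElem e3
  intro j hj hj'
  have := h4 c i j
  unfold pvGet3 at this
  rwa [List.getD_eq_getElem x [] hc, List.getD_eq_getElem y [] hc',
    List.getD_eq_getElem _ [] hi, List.getD_eq_getElem _ [] hi',
    List.getD_eq_getElem _ 0 hj, List.getD_eq_getElem _ 0 hj'] at this

-- the write lists of the two programs
def pvWA (CH R C p : Int) : List (Int × Int × Int) :=
  (PySem.List.pyRange 0 CH 1).flatMap (fun ch =>
    (PySem.List.pyRange 0 p 1).flatMap (fun j =>
      (PySem.List.pyRange 0 R 1).flatMap (fun i => [(ch, i, j), (ch, i, C - 1 - j)])) ++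
    (PySem.List.pyRange 0 p 1).flatMap (fun i =>
      (PySem.List.pyRange 0 C 1).flatMap (fun j => [(ch, i, j), (ch, R - 1 - i, j)])))

def pvWB (CH R C p : Int) : List (Int × Int × Int) :=
  (PySem.List.pyRange 0 CH 1).flatMap (fun ch =>
    (PySem.List.pyRange 0 R 1).flatMap (fun i =>
      (PySem.List.pyRange 0 C 1).flatMap (fun j =>
        if i < p ∨ i ≥ R - p ∨ j < p ∨ j ≥ C - p then [(ch, i, j)] else [])))

theorem zero_pad_eq (a : List (List (List Int))) (CH R C F : Int) :
    zero_pad a CH R C F = pvApply (pvWA CH R C (PySem.Int.truncdiv (F - 1) 2)) a := by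
  unfold zero_pad pvWA
  have h1 : ∀ (ch j : Int) (a0 : List (List (List Int))),
      (PySem.List.pyRange 0 R 1).foldl
        (fun a i => pySet3 (pySet3 a ch i j 0) ch i (C - 1 - j) 0) a0 =
      pvApply ((PySem.List.pyRange 0 R 1).flatMap (fun i => [(ch, i, j), (ch, i, C - 1 - j)])) a0 :=
    fun ch j a0 => foldl_pvApply (PySem.List.pyRange 0 R 1) (fun i => [(ch, i, j), (ch, i, C - 1 - j)]) a0
  have h2 : ∀ (ch i : Int) (a0 : List (List (List Int))),
      (PySem.List.pyRange 0 C 1).foldl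
        (fun a j => pySet3 (pySet3 a ch i j 0) ch (R - 1 - i) j 0) a0 =
      pvApply ((PySem.List.pyRange 0 C 1).flatMap (fun j => [(ch, i, j), (ch, R - 1 - i, j)])) a0 :=
    fun ch i a0 => foldl_pvApply (PySem.List.pyRange 0 C 1) (fun j => [(ch, i, j), (ch, R - 1 - i, j)]) a0
  have hfun : (fun (a : List (List (List Int))) (ch : Int) =>
      (PySem.List.pyRange 0 (PySem.Int.truncdiv (F - 1) 2) 1).foldl
        (fun a i => (PySem.List.pyRange 0 C 1).foldl
          (fun a j => pySet3 (pySet3 a ch i j 0) ch (R - 1 - i) j 0) a)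
        ((PySem.List.pyRange 0 (PySem.Int.truncdiv (F - 1) 2) 1).foldl
          (fun a j => (PySem.List.pyRange 0 R 1).foldl
            (fun a i => pySet3 (pySet3 a ch i j 0) ch i (C - 1 - j) 0) a) a)) =
      fun a ch => pvApply
        ((PySem.List.pyRange 0 (PySem.Int.truncdiv (F - 1) 2) 1).flatMap (fun j =>
          (PySem.List.pyRange 0 R 1).flatMap (fun i => [(ch, i, j), (ch, i, C - 1 - j)])) ++
         (PySem.List.pyRange 0 (PySem.Int.truncdiv (F - 1) 2) 1).flatMap (fun i =>
          (PySem.List.pyRange 0 C 1).flatMap (fun j => [(ch, i, j), (ch, R - 1 - i, j)]))) a := by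
    funext a ch
    rw [pvApply_append]
    rw [show (fun (a : List (List (List Int))) (j : Int) =>
        (PySem.List.pyRange 0 R 1).foldl
          (fun a i => pySet3 (pySet3 a ch i j 0) ch i (C - 1 - j) 0) a) =
      (fun a j => pvApply ((PySem.List.pyRange 0 R 1).flatMap
          (fun i => [(ch, i, j), (ch, i, C - 1 - j)])) a) from funext fun a => funext fun j => h1 ch j a]
    rw [foldl_pvApply]
    rw [show (fun (a : List (List (List Int))) (i : Int) =>
        (PySem.List.pyRange 0 C 1).foldl
          (fun a j => pySet3 (pySet3 a ch i j 0) ch (R - 1 - i) j 0) a) =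
      (fun a i => pvApply ((PySem.List.pyRange 0 C 1).flatMap
          (fun j => [(ch, i, j), (ch, R - 1 - i, j)])) a) from funext fun a => funext fun i => h2 ch i a]
    rw [foldl_pvApply]
  rw [hfun, foldl_pvApply]

theorem zero_pad_alt_eq (a : List (List (List Int))) (CH R C F : Int)
    (hp : 1 ≤ PySem.Int.truncdiv (F - 1) 2) :
    zero_pad_alt a CH R C F = pvApply (pvWB CH R C (PySem.Int.truncdiv (F - 1) 2)) a := by
  unfold zero_pad_alt pvWB
  dsimp only
  rw [if_neg (by omega)]
  have h1 : ∀ (ch i : Int) (a0 : List (List (List Int))),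
      (PySem.List.pyRange 0 C 1).foldl
        (fun a j => if i < PySem.Int.truncdiv (F - 1) 2 ∨ i ≥ R - PySem.Int.truncdiv (F - 1) 2 ∨
            j < PySem.Int.truncdiv (F - 1) 2 ∨ j ≥ C - PySem.Int.truncdiv (F - 1) 2
          then pySet3 a ch i j 0 else a) a0 =
      pvApply ((PySem.List.pyRange 0 C 1).flatMap (fun j =>
        if i < PySem.Int.truncdiv (F - 1) 2 ∨ i ≥ R - PySem.Int.truncdiv (F - 1) 2 ∨
            j < PySem.Int.truncdiv (F - 1) 2 ∨ j ≥ C - PySem.Int.truncdiv (F - 1) 2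
          then [(ch, i, j)] else [])) a0 := by
    intro ch i a0
    rw [← foldl_pvApply]
    apply PySem.List.foldl_congr_mem
    intro acc j _
    rw [pvApply_if]
    split <;> rfl
  have hfun : (fun (a : List (List (List Int))) (ch : Int) =>
      (PySem.List.pyRange 0 R 1).foldl (fun a i =>
        (PySem.List.pyRange 0 C 1).foldl
          (fun a j => if i < PySem.Int.truncdiv (F - 1) 2 ∨ i ≥ R - PySem.Int.truncdiv (F - 1) 2 ∨
              j < PySem.Int.truncdiv (F - 1) 2 ∨ j ≥ C - PySem.Int.truncdiv (F - 1) 2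
            then pySet3 a ch i j 0 else a) a) a) =
      fun a ch => pvApply ((PySem.List.pyRange 0 R 1).flatMap (fun i =>
        (PySem.List.pyRange 0 C 1).flatMap (fun j =>
          if i < PySem.Int.truncdiv (F - 1) 2 ∨ i ≥ R - PySem.Int.truncdiv (F - 1) 2 ∨
              j < PySem.Int.truncdiv (F - 1) 2 ∨ j ≥ C - PySem.Int.truncdiv (F - 1) 2
            then [(ch, i, j)] else []))) a := by
    funext a ch
    rw [← foldl_pvApply]
    apply PySem.List.foldl_congr_mem
    intro acc i _
    rw [h1 ch i acc]
  rw [hfun, foldl_pvApply]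

-- every write of either program lies in the box [0,CH) x [0,R) x [0,C)
theorem pvInB_of_box (a : List (List (List Int))) (CH R C : Int)
    (hlen : CH.toNat ≤ a.length)
    (hsh : ∀ l ∈ a.take CH.toNat, R.toNat ≤ l.length ∧ ∀ r ∈ l.take R.toNat, C.toNat ≤ r.length)
    (c i j : Int) (hc : 0 ≤ c ∧ c < CH) (hi : 0 ≤ i ∧ i < R) (hj : 0 ≤ j ∧ j < C) :
    pvInB a (c, i, j) := by
  have hcl : c.toNat < a.length := by omega
  have hlmem : a.getD c.toNat [] ∈ a.take CH.toNat := by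
    have hcl' : c.toNat < (a.take CH.toNat).length := by rw [List.length_take]; omega
    have : (a.take CH.toNat)[c.toNat] = a[c.toNat] := List.getElem_take
    rw [List.getD_eq_getElem a [] hcl, ← this]
    exact List.getElem_mem hcl'
  obtain ⟨hR, hrow⟩ := hsh _ hlmem
  have hil : i.toNat < (a.getD c.toNat []).length := by omega
  have hrmem : (a.getD c.toNat []).getD i.toNat [] ∈ (a.getD c.toNat []).take R.toNat := by
    have hil' : i.toNat < ((a.getD c.toNat []).take R.toNat).length := by
      rw [List.length_take]; omega
    have : ((a.getD c.toNat []).take R.toNat)[i.toNat] = (a.getD c.toNat [])[i.toNat] :=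
      List.getElem_take
    rw [List.getD_eq_getElem _ [] hil, ← this]
    exact List.getElem_mem hil'
  have hC := hrow _ hrmem
  unfold pvInB pvLen2 pvLen3
  dsimp only
  refine ⟨hc.1, by omega, hi.1, by omega, hj.1, by omega⟩

theorem pvWA_box (CH R C p : Int) (hp : 1 ≤ p) (hpR : p ≤ R) (hpC : p ≤ C)
    (w : Int × Int × Int) (hw : w ∈ pvWA CH R C p) :
    (0 ≤ w.1 ∧ w.1 < CH) ∧ (0 ≤ w.2.1 ∧ w.2.1 < R) ∧ (0 ≤ w.2.2 ∧ w.2.2 < C) := by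
  simp only [pvWA, List.mem_flatMap, List.mem_append, PySem.List.mem_pyRange_one,
    List.mem_cons, List.not_mem_nil, or_false] at hw
  obtain ⟨ch, hch, hcase⟩ := hw
  rcases hcase with ⟨j0, hj0, i0, hi0, rfl | rfl⟩ | ⟨i0, hi0, j0, hj0, rfl | rfl⟩ <;>
    exact ⟨⟨by dsimp only; omega, by dsimp only; omega⟩, ⟨by dsimp only; omega, by dsimp only; omega⟩,
      by dsimp only; omega, by dsimp only; omega⟩

theorem pvWB_box (CH R C p : Int) (w : Int × Int × Int) (hw : w ∈ pvWB CH R C p) :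
    (0 ≤ w.1 ∧ w.1 < CH) ∧ (0 ≤ w.2.1 ∧ w.2.1 < R) ∧ (0 ≤ w.2.2 ∧ w.2.2 < C) := by
  simp only [pvWB, List.mem_flatMap, PySem.List.mem_pyRange_one] at hw
  obtain ⟨ch, hch, i, hi, j, hj, hmem⟩ := hw
  have hmem' : w = (ch, i, j) := by
    rcases Decidable.em (i < p ∨ i ≥ R - p ∨ j < p ∨ j ≥ C - p) with hcond | hcond
    · rw [if_pos hcond] at hmem; rwa [List.mem_singleton] at hmem
    · rw [if_neg hcond] at hmem; simp at hmem
  subst hmem'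
  exact ⟨⟨by dsimp only; omega, by dsimp only; omega⟩, ⟨by dsimp only; omega, by dsimp only; omega⟩,
    by dsimp only; omega, by dsimp only; omega⟩

-- the two programs write the same SET of cells
theorem pvW_same (CH R C p : Int) (hp : 1 ≤ p) (hpR : p ≤ R) (hpC : p ≤ C) (c' i' j' : Nat) :
    (∃ w ∈ pvWA CH R C p, w.1.toNat = c' ∧ w.2.1.toNat = i' ∧ w.2.2.toNat = j') ↔
    (∃ w ∈ pvWB CH R C p, w.1.toNat = c' ∧ w.2.1.toNat = i' ∧ w.2.2.toNat = j') := by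
  constructor
  · rintro ⟨w, hw, hc, hi, hj⟩
    simp only [pvWA, List.mem_flatMap, List.mem_append, PySem.List.mem_pyRange_one,
      List.mem_cons, List.not_mem_nil, or_false] at hw
    obtain ⟨ch, hch, hcase⟩ := hw
    rcases hcase with ⟨j0, hj0, i0, hi0, rfl | rfl⟩ | ⟨i0, hi0, j0, hj0, rfl | rfl⟩
    · exact ⟨(ch, i0, j0), by
        simp only [pvWB, List.mem_flatMap, PySem.List.mem_pyRange_one]
        exact ⟨ch, by omega, i0, by omega, j0, by omega, by
          rw [if_pos (by omega)]; simp⟩, hc, hi, hj⟩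
    · exact ⟨(ch, i0, C - 1 - j0), by
        simp only [pvWB, List.mem_flatMap, PySem.List.mem_pyRange_one]
        exact ⟨ch, by omega, i0, by omega, C - 1 - j0, by omega, by
          rw [if_pos (by omega)]; simp⟩, hc, hi, hj⟩
    · exact ⟨(ch, i0, j0), by
        simp only [pvWB, List.mem_flatMap, PySem.List.mem_pyRange_one]
        exact ⟨ch, by omega, i0, by omega, j0, by omega, by
          rw [if_pos (by omega)]; simp⟩, hc, hi, hj⟩
    · exact ⟨(ch, R - 1 - i0, j0), by
        simp only [pvWB, List.mem_flatMap, PySem.List.mem_pyRange_one]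
        exact ⟨ch, by omega, R - 1 - i0, by omega, j0, by omega, by
          rw [if_pos (by omega)]; simp⟩, hc, hi, hj⟩
  · rintro ⟨w, hw, hc, hi, hj⟩
    simp only [pvWB, List.mem_flatMap, PySem.List.mem_pyRange_one] at hw
    obtain ⟨ch, hch, i, hiB, j, hjB, hmem⟩ := hw
    have hmem' : (i < p ∨ i ≥ R - p ∨ j < p ∨ j ≥ C - p) ∧ w = (ch, i, j) := by
      rcases Decidable.em (i < p ∨ i ≥ R - p ∨ j < p ∨ j ≥ C - p) with hcond | hcond
      · rw [if_pos hcond] at hmem; rw [List.mem_singleton] at hmem; exact ⟨hcond, hmem⟩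
      · rw [if_neg hcond] at hmem; simp at hmem
    obtain ⟨hcond, rfl⟩ := hmem'
    refine ⟨(ch, i, j), ?_, hc, hi, hj⟩
    simp only [pvWA, List.mem_flatMap, List.mem_append, PySem.List.mem_pyRange_one,
      List.mem_cons, List.not_mem_nil, or_false]
    rcases hcond with h | h | h | h
    · -- top rows: second nest, i0 := i, j0 := j
      exact ⟨ch, by omega, Or.inr ⟨i, by omega, j, by omega, Or.inl rfl⟩⟩
    · -- bottom rows: second nest mirrored, i0 := R - 1 - i
      exact ⟨ch, by omega, Or.inr ⟨R - 1 - i, by omega, j, by omega,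
        Or.inr (by simp only [Prod.mk.injEq, true_and, and_true]; omega)⟩⟩
    · -- left columns: first nest, j0 := j
      exact ⟨ch, by omega, Or.inl ⟨j, by omega, i, by omega, Or.inl rfl⟩⟩
    · -- right columns: first nest mirrored, j0 := C - 1 - j
      exact ⟨ch, by omega, Or.inl ⟨C - 1 - j, by omega, i, by omega,
        Or.inr (by simp only [Prod.mk.injEq, true_and, and_true]; omega)⟩⟩

-- p ≤ 0: both programs touch nothing
theorem zero_pad_of_nonpos (a : List (List (List Int))) (CH R C F : Int)
    (hp : PySem.Int.truncdiv (F - 1) 2 ≤ 0) : zero_pad a CH R C F = a := by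
  unfold zero_pad
  have hnil : PySem.List.pyRange 0 (PySem.Int.truncdiv (F - 1) 2) 1 = [] :=
    PySem.List.pyRange_one_eq_nil (by omega)
  rw [hnil]
  simp [PySem.List.foldl_ignore]

theorem zero_pad_alt_of_nonpos (a : List (List (List Int))) (CH R C F : Int)
    (hp : PySem.Int.truncdiv (F - 1) 2 ≤ 0) : zero_pad_alt a CH R C F = a := by
  unfold zero_pad_alt
  dsimp only
  rw [if_pos hp]

theorem zero_pad_of_CH_nonpos (a : List (List (List Int))) (CH R C F : Int) (hCH : CH ≤ 0) :
    zero_pad a CH R C F = a := by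
  unfold zero_pad
  rw [show PySem.List.pyRange 0 CH 1 = [] from PySem.List.pyRange_one_eq_nil (by omega)]
  rfl

theorem zero_pad_alt_of_CH_nonpos (a : List (List (List Int))) (CH R C F : Int) (hCH : CH ≤ 0) :
    zero_pad_alt a CH R C F = a := by
  unfold zero_pad_alt
  dsimp only
  split
  · rfl
  · rw [show PySem.List.pyRange 0 CH 1 = [] from PySem.List.pyRange_one_eq_nil (by omega)]
    rfl

-- ===== VERDICT (by name: the statement is the Claim_ definition above) =====
theorem zero_pad_spec : Claim_equal_zero_pad := by
  intro a CH R C F _ hPre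
  unfold Spec_zero_pad
  by_cases hp : 1 ≤ PySem.Int.truncdiv (F - 1) 2
  swap
  · rw [zero_pad_of_nonpos a CH R C F (by omega), zero_pad_alt_of_nonpos a CH R C F (by omega)]
  by_cases hCH : 0 < CH
  swap
  · rw [zero_pad_of_CH_nonpos a CH R C F (by omega), zero_pad_alt_of_CH_nonpos a CH R C F (by omega)]
  · obtain ⟨hpR, hpC, hlen, hsh⟩ := hPre hp hCH
    have HWA : ∀ w ∈ pvWA CH R C (PySem.Int.truncdiv (F - 1) 2), pvInB a w := by
      intro w hw
      obtain ⟨hc, hi, hj⟩ := pvWA_box _ _ _ _ hp hpR hpC w hw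
      exact pvInB_of_box a CH R C hlen hsh w.1 w.2.1 w.2.2 hc hi hj
    have HWB : ∀ w ∈ pvWB CH R C (PySem.Int.truncdiv (F - 1) 2), pvInB a w := by
      intro w hw
      obtain ⟨hc, hi, hj⟩ := pvWB_box _ _ _ _ w hw
      exact pvInB_of_box a CH R C hlen hsh w.1 w.2.1 w.2.2 hc hi hj
    rw [zero_pad_eq, zero_pad_alt_eq a CH R C F hp]
    apply pvExt
    · rw [pvLen1_pvApply, pvLen1_pvApply]
    · intro c; rw [pvLen2_pvApply, pvLen2_pvApply]
    · intro c i; rw [pvLen3_pvApply, pvLen3_pvApply]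
    · intro c i j
      rw [pvGet3_pvApply _ _ HWA, pvGet3_pvApply _ _ HWB]
      simp only [pvW_same CH R C (PySem.Int.truncdiv (F - 1) 2) hp hpR hpC c i j]
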